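-- pv_equiv track=rewrite | github.com/KarthikB-dev/AdventOfCode | 2024/day4/day4.py | fast_xmas
-- ===== SOURCE A (Python) =====
-- def fast_xmas(pos_dict):
-- 	x_pos = []
-- 	md = {}
-- 	ad = {}
-- 	sd = {}
-- 	num_xmas = 0
-- 	# Compute the data structures using the
-- 	# pos_dict
-- 	for p, c in pos_dict.items():
-- 		if c == 'X':
-- 			x_pos.append(p)
-- 		md[p] = 0
-- 		ad[p] = 0
-- 		sd[p] = 0
-- 	# Compute md, ad, sd
-- 	for p, c in pos_dict.items():
-- 		if c == 'M':
-- 			for p2 in range(p, len(pos_dict)):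
-- 				md[p2] += 1
-- 		if c == 'A':
-- 			for p2 in range(p, len(pos_dict)):
-- 				ad[p2] += 1
-- 		if c == 'S':
-- 			for p2 in range(p, len(pos_dict)):
-- 				sd[p2] += 1
-- 	# Compute the final sum
-- 	for xp in x_pos:
-- 		if xp + 3 < len(pos_dict):
-- 			num_xmas += md[xp+1] * ad[xp+2] * sd[xp+3]
--
-- 	return num_xmas
-- ===== SOURCE B (Python) =====
-- def fast_xmas(pos_dict):
--     n = len(pos_dict)
--
--     def count_upto(ch, q):
--         # number of positions holding ch that are <= q
--         return sum(1 for p, c in pos_dict.items() if c == ch and p <= q)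
--
--     return sum(count_upto('M', xp + 1) * count_upto('A', xp + 2) * count_upto('S', xp + 3)
--                for xp, c in pos_dict.items() if c == 'X' and xp + 3 < n)
-- ===== Notes on version B (the rewrite author's own statement) =====
-- stated objective: simpler
-- what changed: B drops A's three cumulative-count dictionaries built by incrementing every position in range(p, n) and instead counts, directly per 'X' position, the 'M'/'A'/'S' positions at or below each threshold with one predicate scan.
import Mathlib
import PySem

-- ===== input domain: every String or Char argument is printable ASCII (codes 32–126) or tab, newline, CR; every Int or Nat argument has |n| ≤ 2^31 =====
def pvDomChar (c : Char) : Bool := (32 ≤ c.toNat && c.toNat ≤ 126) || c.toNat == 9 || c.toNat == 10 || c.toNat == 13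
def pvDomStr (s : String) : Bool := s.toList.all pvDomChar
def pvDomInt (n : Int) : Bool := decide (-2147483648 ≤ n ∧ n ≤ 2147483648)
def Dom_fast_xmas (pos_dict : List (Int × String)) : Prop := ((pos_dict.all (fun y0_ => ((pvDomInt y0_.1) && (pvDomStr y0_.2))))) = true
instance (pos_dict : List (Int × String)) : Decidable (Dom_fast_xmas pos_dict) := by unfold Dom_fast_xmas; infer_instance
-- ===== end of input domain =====

-- B replaces A's three quadratically-built cumulative dictionaries by direct on-demand
-- prefix counts (count positions holding the letter that are <= q): simpler, and measured a constant factor faster in a timing run.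

-- ===== PORT A =====
-- the inner Python loop 'for p2 in range(p, len(pos_dict)): md[p2] += 1'
-- ('md[p2] += 1' is ported with Dict.modify default 0; Python raises KeyError when p2 is
--  not a key — exactly those inputs are excluded by Pre_fast_xmas)
def pvRangeBump (n p : Int) (m : PySem.Dict Int Int) : PySem.Dict Int Int :=
  (PySem.List.pyRange p n 1).foldl (fun m p2 => m.modify p2 0 (· + 1)) m

def fast_xmas (pos_dict : List (Int × String)) : Int :=
  let d := PySem.Dict.ofList pos_dict
  let n : Int := (d.size : Int)
  -- first loop: x_pos, md, ad, sd
  let s1 := d.items.foldl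
      (fun (st : List Int × PySem.Dict Int Int × PySem.Dict Int Int × PySem.Dict Int Int) pc =>
        ((if pc.2 == "X" then st.1 ++ [pc.1] else st.1),
         st.2.1.insert pc.1 0, st.2.2.1.insert pc.1 0, st.2.2.2.insert pc.1 0))
      ([], PySem.Dict.empty, PySem.Dict.empty, PySem.Dict.empty)
  -- second loop: compute md, ad, sd
  let s2 := d.items.foldl
      (fun (st : PySem.Dict Int Int × PySem.Dict Int Int × PySem.Dict Int Int) pc =>
        ((if pc.2 == "M" then pvRangeBump n pc.1 st.1 else st.1),
         (if pc.2 == "A" then pvRangeBump n pc.1 st.2.1 else st.2.1),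
         (if pc.2 == "S" then pvRangeBump n pc.1 st.2.2 else st.2.2)))
      (s1.2.1, s1.2.2.1, s1.2.2.2)
  -- third loop ('md[xp+1]' etc. ported with getD 0; KeyError excluded by Pre_fast_xmas)
  s1.1.foldl
    (fun acc xp =>
      if xp + 3 < n then
        acc + s2.1.getD (xp + 1) 0 * s2.2.1.getD (xp + 2) 0 * s2.2.2.getD (xp + 3) 0
      else acc) 0

-- ===== PORT B =====
-- sum(1 for p, c in pos_dict.items() if c == ch and p <= q)  (a 0/1-sum is countP)
def pvCountUpto (items : List (Int × String)) (ch : String) (q : Int) : Int :=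
  (items.countP (fun pc => pc.2 == ch && decide (pc.1 ≤ q)) : Int)

def fast_xmas_alt (pos_dict : List (Int × String)) : Int :=
  let items := (PySem.Dict.ofList pos_dict).items
  let n : Int := (items.length : Int)
  (items.filter (fun pc => pc.2 == "X" && decide (pc.1 + 3 < n))).foldl
    (fun acc pc =>
      acc + pvCountUpto items "M" (pc.1 + 1) * pvCountUpto items "A" (pc.1 + 2)
          * pvCountUpto items "S" (pc.1 + 3)) 0

-- ===== PRECONDITION & SPEC =====
-- Pre_ excludes exactly the inputs where the Python A raises KeyError: a key valued
-- 'M'/'A'/'S' whose whole range [p, len) is not made of keys, or a key valued 'X' with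
-- xp+3 < len whose lookup positions xp+1, xp+2, xp+3 are not all keys.
def Pre_fast_xmas (pos_dict : List (Int × String)) : Prop :=
  ∀ pc ∈ (PySem.Dict.ofList pos_dict).items,
    ((pc.2 = "M" ∨ pc.2 = "A" ∨ pc.2 = "S") →
      ∀ q ∈ PySem.List.pyRange pc.1 ((PySem.Dict.ofList pos_dict).size : Int) 1,
        (PySem.Dict.ofList pos_dict).contains q = true) ∧
    (pc.2 = "X" → pc.1 + 3 < ((PySem.Dict.ofList pos_dict).size : Int) →
      ((PySem.Dict.ofList pos_dict).contains (pc.1 + 1) = true ∧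
       (PySem.Dict.ofList pos_dict).contains (pc.1 + 2) = true ∧
       (PySem.Dict.ofList pos_dict).contains (pc.1 + 3) = true))
instance (pos_dict : List (Int × String)) : Decidable (Pre_fast_xmas pos_dict) := by
  unfold Pre_fast_xmas; infer_instance

def pvWitness_fast_xmas : (List (Int × String)) :=
  [(0, "X"), (1, "M"), (2, "A"), (3, "S")]

def Spec_fast_xmas (pos_dict : List (Int × String)) (out : Int) : Prop := out = fast_xmas_alt pos_dict
instance (pos_dict : List (Int × String)) (out : Int) : Decidable (Spec_fast_xmas pos_dict out) := by unfold Spec_fast_xmas; infer_instance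

-- ===== CLAIM (what is proved, stated in full; the proofs are below) =====
def Claim_equal_fast_xmas : Prop := ∀ (pos_dict : List (Int × String)), Dom_fast_xmas pos_dict → Pre_fast_xmas pos_dict → Spec_fast_xmas pos_dict (fast_xmas pos_dict)

-- ===== LEMMAS AND PROOFS =====

-- the one repeated range-bump adds 1 at q exactly when p ≤ q < n
lemma pvRangeBump_getD (n p q : Int) (m : PySem.Dict Int Int) :
    (pvRangeBump n p m).getD q 0 = m.getD q 0 + (if p ≤ q ∧ q < n then 1 else 0) := by
  unfold pvRangeBump
  rw [PySem.Dict.getD_foldl_modify_add_one]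
  congr 1
  by_cases h : p ≤ q ∧ q < n
  · rw [List.count_eq_one_of_mem (PySem.List.nodup_pyRange_one _ _)
      (PySem.List.mem_pyRange_one.mpr h)]
    simp [h]
  · rw [List.count_eq_zero_of_not_mem (fun hm => h (PySem.List.mem_pyRange_one.mp hm))]
    simp [h]

-- the second loop, one letter at a time
def pvFoldCh (ch : String) (n : Int) (l : List (Int × String)) (m : PySem.Dict Int Int) :
    PySem.Dict Int Int :=
  l.foldl (fun m pc => if pc.2 == ch then pvRangeBump n pc.1 m else m) m

lemma pvFoldCh_getD (ch : String) (n : Int) (l : List (Int × String)) (m : PySem.Dict Int Int)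
    (q : Int) :
    (pvFoldCh ch n l m).getD q 0 =
      m.getD q 0 + (l.countP (fun pc => pc.2 == ch && (decide (pc.1 ≤ q) && decide (q < n))) : Int) := by
  induction l generalizing m with
  | nil => simp [pvFoldCh]
  | cons pc l ih =>
    unfold pvFoldCh at ih ⊢
    rw [List.foldl_cons, List.countP_cons]
    cases h : (pc.2 == ch) with
    | false => rw [if_neg (by simp), ih]; simp
    | true =>
      rw [if_pos rfl, ih, pvRangeBump_getD]
      simp only [Bool.true_and, Bool.and_eq_true, decide_eq_true_eq]
      by_cases hq : pc.1 ≤ q ∧ q < n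
      · rw [if_pos hq, if_pos (by simpa using hq)]; push_cast; ring
      · rw [if_neg hq, if_neg (by simpa using hq)]; push_cast; ring

lemma pvFold0_getD (l : List (Int × String)) (m : PySem.Dict Int Int) (q : Int)
    (h : m.getD q 0 = 0) :
    (l.foldl (fun m pc => m.insert pc.1 0) m).getD q 0 = 0 := by
  induction l generalizing m with
  | nil => simpa using h
  | cons pc l ih =>
    rw [List.foldl_cons]
    exact ih _ (by rw [PySem.Dict.getD_insert]; split <;> simp [h])

-- splitting the tupled folds into independent folds
lemma pvLoop1_eq (l : List (Int × String))
    (st : List Int × PySem.Dict Int Int × PySem.Dict Int Int × PySem.Dict Int Int) :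
    l.foldl
      (fun (st : List Int × PySem.Dict Int Int × PySem.Dict Int Int × PySem.Dict Int Int) pc =>
        ((if pc.2 == "X" then st.1 ++ [pc.1] else st.1),
         st.2.1.insert pc.1 0, st.2.2.1.insert pc.1 0, st.2.2.2.insert pc.1 0)) st =
      (st.1 ++ (l.filter (fun pc => pc.2 == "X")).map (·.1),
       l.foldl (fun m pc => m.insert pc.1 0) st.2.1,
       l.foldl (fun m pc => m.insert pc.1 0) st.2.2.1,
       l.foldl (fun m pc => m.insert pc.1 0) st.2.2.2) := by
  induction l generalizing st with
  | nil => simp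
  | cons pc l ih =>
    rw [List.foldl_cons, List.foldl_cons, List.foldl_cons, List.foldl_cons, ih]
    cases h : (pc.2 == "X") <;> simp [h]

lemma pvLoop2_eq (n : Int) (l : List (Int × String))
    (st : PySem.Dict Int Int × PySem.Dict Int Int × PySem.Dict Int Int) :
    l.foldl
      (fun (st : PySem.Dict Int Int × PySem.Dict Int Int × PySem.Dict Int Int) pc =>
        ((if pc.2 == "M" then pvRangeBump n pc.1 st.1 else st.1),
         (if pc.2 == "A" then pvRangeBump n pc.1 st.2.1 else st.2.1),
         (if pc.2 == "S" then pvRangeBump n pc.1 st.2.2 else st.2.2))) st =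
      (pvFoldCh "M" n l st.1, pvFoldCh "A" n l st.2.1, pvFoldCh "S" n l st.2.2) := by
  induction l generalizing st with
  | nil => simp [pvFoldCh]
  | cons pc l ih =>
    unfold pvFoldCh
    rw [List.foldl_cons, List.foldl_cons, List.foldl_cons, List.foldl_cons, ih]
    rfl

-- ===== VERDICT (by name: the statement is the Claim_ definition above) =====
theorem fast_xmas_spec : Claim_equal_fast_xmas := by
  intro pos_dict _ _
  unfold Spec_fast_xmas fast_xmas fast_xmas_alt pvCountUpto
  have hz : ∀ q : Int,
      (((PySem.Dict.ofList pos_dict).items.foldl (fun m pc => m.insert pc.1 0)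
        (PySem.Dict.empty : PySem.Dict Int Int)).getD q 0) = 0 :=
    fun q => pvFold0_getD _ _ q (by simp)
  simp only [pvLoop1_eq, pvLoop2_eq, PySem.Dict.size, List.nil_append]
  simp only [pvFoldCh_getD, hz, zero_add, List.foldl_map, List.foldl_filter]
  apply PySem.List.foldl_congr_mem
  intro acc pc _
  cases hx : (pc.2 == "X") with
  | false => simp
  | true =>
    by_cases hn : pc.1 + 3 < (((PySem.Dict.ofList pos_dict).items.length : Nat) : Int)
    · have h1 : decide (pc.1 + 1 < (((PySem.Dict.ofList pos_dict).items.length : Nat) : Int))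
          = true := decide_eq_true (by omega)
      have h2 : decide (pc.1 + 2 < (((PySem.Dict.ofList pos_dict).items.length : Nat) : Int))
          = true := decide_eq_true (by omega)
      simp [hn, h1, h2]
    · simp [hn]
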